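-- pv_equiv track=rewrite | github.com/venux021/soda | zcy2/c5/q06.py | replace_continuous
-- ===== SOURCE A (Python) =====
-- def replace_continuous(s, f, t):
--     buf = []
--     start = 0
--     last_tail = -1
--     while True:
--         i = dofind(s, f, start)
--         if i == -1:
--             break
--         if i > start:
--             buf.append(s[start:i])
--         if last_tail < i - 1:
--             buf.append(t)
--         start = i + len(f)
--         last_tail = start - 1
--     if start < len(s):
--         buf.append(s[start:])
--     return ''.join(buf)
--
-- def dofind(s, f, j):
--     i = 0
--     while i < len(f) and j < len(s):
--         if f[i] == s[j]:
--             i += 1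
--             j += 1
--         else:
--             i = 0
--             j = j - i + 1
--     return j - len(f) if i == len(f) else -1
-- ===== SOURCE B (Python) =====
-- def replace_continuous(s, f, t):
--     out = []
--     i = 0          # length of the prefix of f matched so far
--     run = False    # True if a replacement was just emitted and no literal text since
--     for c in s:
--         if i < len(f) and c == f[i]:
--             i += 1
--             if i == len(f):      # a full (non-backtracking) match: one run element
--                 if not run:
--                     out.append(t)
--                 run = True
--                 i = 0
--         else:                    # mismatch: the partial match and c are literal text
--             out.append(f[:i])
--             out.append(c)
--             run = False
--             i = 0
--     out.append(f[:i])            # trailing partial match is literal text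
--     return ''.join(out)
-- ===== Notes on version B (the rewrite author's own statement) =====
-- stated objective: simpler
-- what changed: A's repeated dofind calls, slice bookkeeping and last_tail adjacency tracking are replaced by one fold over the characters of s carrying only a matched-prefix counter and a just-replaced flag; no index arithmetic, no slicing of s, no helper function.
-- intended difference: When s starts with f (and t is nonempty), A emits no replacement at all for the leading run because last_tail starts at -1 (A('ab','ab','X') == ''), while B emits the single t a run is meant to become (B gives 'X'); B's value is the intended one. — e.g. on replace_continuous("ab", "ab", "X"): A returns "", B returns "X"
import Mathlib
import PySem

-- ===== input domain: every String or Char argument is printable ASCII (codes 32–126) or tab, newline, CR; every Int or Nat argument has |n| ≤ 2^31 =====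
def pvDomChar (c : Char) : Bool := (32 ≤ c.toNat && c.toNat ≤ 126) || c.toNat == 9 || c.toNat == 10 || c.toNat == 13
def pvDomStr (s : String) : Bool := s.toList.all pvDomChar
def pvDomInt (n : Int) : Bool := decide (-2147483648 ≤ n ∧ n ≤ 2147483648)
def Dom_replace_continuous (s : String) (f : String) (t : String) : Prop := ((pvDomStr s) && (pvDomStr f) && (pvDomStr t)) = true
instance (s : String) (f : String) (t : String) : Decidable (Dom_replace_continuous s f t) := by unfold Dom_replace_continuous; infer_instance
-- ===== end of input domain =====

-- B replaces A's repeated dofind calls, slice bookkeeping and last_tail adjacency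
-- tracking by one fold over the characters of s carrying a matched-prefix counter and
-- a just-replaced flag (objective: simpler); where s starts with f, A drops the
-- leading replacement and B keeps it (see D_replace_continuous below).

-- ===== PORT A =====
-- inner 'while' of dofind, state (i, j); the fuel argument only makes the recursion
-- structural: one unit per iteration, each iteration needs j < len s and does j += 1,
-- so fuel = s.length + 1 is never exhausted for the j ≥ 0 this program calls it with
def dofindLoop (s f : List Char) : Nat → Int → Int → Int
  | 0, i, j => if i = (f.length : Int) then j - (f.length : Int) else -1
  | fuel + 1, i, j =>
    if i < (f.length : Int) ∧ j < (s.length : Int) then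
      if PySem.List.pyGet? f i = PySem.List.pyGet? s j then
        dofindLoop s f fuel (i + 1) (j + 1)
      else
        dofindLoop s f fuel 0 (j + 1)
    else
      if i = (f.length : Int) then j - (f.length : Int) else -1

def dofind (s f : List Char) (j : Int) : Int := dofindLoop s f (s.length + 1) 0 j

-- outer 'while True' of replace_continuous; again fuel only makes the loop total
-- (for f ≠ [] it is never exhausted: start grows by at least 1 per iteration)
def rcLoop (s f t : List Char) : Nat → List (List Char) → Int → Int → List (List Char) × Int
  | 0, buf, start, _ => (buf, start)
  | fuel + 1, buf, start, last_tail =>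
    let i := dofind s f start
    if i = -1 then (buf, start)
    else
      let buf1 := if i > start then buf ++ [PySem.List.slice s (some start) (some i)] else buf
      let buf2 := if last_tail < i - 1 then buf1 ++ [t] else buf1
      rcLoop s f t fuel buf2 (i + (f.length : Int)) (i + (f.length : Int) - 1)

def replace_continuous (s : String) (f : String) (t : String) : String :=
  let sl := s.toList
  let res := rcLoop sl f.toList t.toList (sl.length + 1) [] 0 (-1)
  let buf := if res.2 < (sl.length : Int) then res.1 ++ [PySem.List.slice sl (some res.2) none] else res.1
  String.ofList buf.flatten

-- ===== PORT B =====
-- one step of B's 'for c in s' loop; state (out, i, run)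
def rcAltStep (f t : List Char) (st : List (List Char) × Int × Bool) (c : Char) : List (List Char) × Int × Bool :=
  if st.2.1 < (f.length : Int) ∧ PySem.List.pyGet? f st.2.1 = some c then
    if st.2.1 + 1 = (f.length : Int) then
      ((if st.2.2 then st.1 else st.1 ++ [t]), 0, true)
    else
      (st.1, st.2.1 + 1, st.2.2)
  else
    (st.1 ++ [PySem.List.slice f none (some st.2.1), [c]], 0, false)

def replace_continuous_alt (s : String) (f : String) (t : String) : String :=
  let fl := f.toList
  let res := s.toList.foldl (rcAltStep fl t.toList) ([], 0, false)
  String.ofList ((res.1 ++ [PySem.List.slice fl none (some res.2.1)]).flatten)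

-- ===== PRECONDITION & SPEC =====
-- Pre_ excludes only f = "": there A's dofind always returns start, start never
-- advances, and the Python loops forever (no value is returned).
def Pre_replace_continuous (s : String) (f : String) (t : String) : Prop := f ≠ ""
instance (s : String) (f : String) (t : String) : Decidable (Pre_replace_continuous s f t) := by unfold Pre_replace_continuous; infer_instance
def pvWitness_replace_continuous : String × String × String := ("hello world", "l", "-")

-- When s starts with f (and t ≠ ""), A emits no replacement for the leading run
-- (last_tail starts at -1, so A "ab" "ab" "X" = ""), while B emits the single t the
-- run is meant to become ("X"); B's value is the intended one.
def D_replace_continuous (s : String) (f : String) (t : String) : Prop :=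
  f.toList <+: s.toList ∧ t ≠ ""
instance (s : String) (f : String) (t : String) : Decidable (D_replace_continuous s f t) := by unfold D_replace_continuous; infer_instance

def Spec_replace_continuous (s : String) (f : String) (t : String) (out : String) : Prop := ¬ D_replace_continuous s f t → out = replace_continuous_alt s f t
instance (s : String) (f : String) (t : String) (out : String) : Decidable (Spec_replace_continuous s f t out) := by unfold Spec_replace_continuous; infer_instance

def pvDiffWitness_replace_continuous : String × String × String := ("ab", "ab", "X")
def pvDiffWitnessOut_replace_continuous : String × String := ("", "X")

-- ===== CLAIM (what is proved, stated in full; the proofs are below) =====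
def Claim_unchanged_replace_continuous : Prop := ∀ (s : String) (f : String) (t : String), Dom_replace_continuous s f t → Pre_replace_continuous s f t → Spec_replace_continuous s f t (replace_continuous s f t)
def Claim_changed_replace_continuous : Prop := Dom_replace_continuous (pvDiffWitness_replace_continuous.1) (pvDiffWitness_replace_continuous.2.1) (pvDiffWitness_replace_continuous.2.2) ∧ Pre_replace_continuous (pvDiffWitness_replace_continuous.1) (pvDiffWitness_replace_continuous.2.1) (pvDiffWitness_replace_continuous.2.2) ∧ D_replace_continuous (pvDiffWitness_replace_continuous.1) (pvDiffWitness_replace_continuous.2.1) (pvDiffWitness_replace_continuous.2.2) ∧ replace_continuous (pvDiffWitness_replace_continuous.1) (pvDiffWitness_replace_continuous.2.1) (pvDiffWitness_replace_continuous.2.2) = pvDiffWitnessOut_replace_continuous.1 ∧ replace_continuous_alt (pvDiffWitness_replace_continuous.1) (pvDiffWitness_replace_continuous.2.1) (pvDiffWitness_replace_continuous.2.2) = pvDiffWitnessOut_replace_continuous.2 ∧ pvDiffWitnessOut_replace_continuous.1 ≠ pvDiffWitnessOut_replace_continuous.2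
def Claim_exact_replace_continuous : Prop := ∀ (s : String) (f : String) (t : String), Dom_replace_continuous s f t → Pre_replace_continuous s f t → D_replace_continuous s f t → replace_continuous s f t ≠ replace_continuous_alt s f t

-- ===== LEMMAS AND PROOFS =====

-- the common reference machine: B's scan, written by structural recursion on the
-- remaining characters; i = matched prefix length of f, run = just replaced
def specScan (f t : List Char) : List Char → Nat → Bool → List Char
  | [], i, _ => f.take i
  | c :: rest, i, run =>
    if i < f.length ∧ f[i]? = some c then
      if i + 1 = f.length then
        (if run then [] else t) ++ specScan f t rest 0 true
      else
        specScan f t rest (i + 1) run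
    else
      f.take i ++ c :: specScan f t rest 0 false

-- B's fold computes specScan
lemma alt_spec (f t : List Char) :
    ∀ (rest : List Char) (out : List (List Char)) (i : Int) (run : Bool),
      0 ≤ i → i ≤ (f.length : Int) →
      (((rest.foldl (rcAltStep f t) (out, i, run)).1 ++
          [PySem.List.slice f none (some ((rest.foldl (rcAltStep f t) (out, i, run)).2.1))]).flatten)
        = out.flatten ++ specScan f t rest i.toNat run := by
  intro rest
  induction rest with
  | nil =>
    intro out i run hi0 hile
    simp only [List.foldl_nil, specScan, List.flatten_append, List.flatten_cons,
      List.flatten_nil, List.append_nil, PySem.List.slice_to f hi0]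
  | cons c rest ih =>
    intro out i run hi0 hile
    rw [List.foldl_cons]
    by_cases hc : i < (f.length : Int) ∧ PySem.List.pyGet? f i = some c
    · have hget : f[i.toNat]? = some c := by
        rw [← PySem.List.pyGet?_of_nonneg f hi0]; exact hc.2
      have hlt : i.toNat < f.length := by omega
      by_cases hlen : i + 1 = (f.length : Int)
      · have hstep : rcAltStep f t (out, i, run) c
            = ((if run then out else out ++ [t]), 0, true) := by
          simp only [rcAltStep, if_pos hc, if_pos hlen]
        rw [hstep, ih _ 0 true le_rfl (by omega)]
        have hlen' : i.toNat + 1 = f.length := by omega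
        simp only [specScan, hlt, hget, and_true, if_pos, hlen', Int.toNat_zero]
        cases run <;> simp
      · have hstep : rcAltStep f t (out, i, run) c = (out, i + 1, run) := by
          simp only [rcAltStep, if_pos hc, if_neg hlen]
        rw [hstep, ih _ (i + 1) run (by omega) (by omega)]
        have h1 : (i + 1).toNat = i.toNat + 1 := by omega
        have hlen' : ¬ (i.toNat + 1 = f.length) := by omega
        simp only [specScan, hlt, hget, and_true, if_pos, if_neg hlen', h1]
    · have hstep : rcAltStep f t (out, i, run) c
          = (out ++ [PySem.List.slice f none (some i), [c]], 0, false) := by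
        simp only [rcAltStep, if_neg hc]
      rw [hstep, ih _ 0 false le_rfl (by omega)]
      have hc' : ¬ (i.toNat < f.length ∧ f[i.toNat]? = some c) := by
        intro h
        exact hc ⟨by omega, by rw [PySem.List.pyGet?_of_nonneg f hi0]; exact h.2⟩
      simp only [specScan, if_neg hc', Int.toNat_zero, List.flatten_append,
        List.flatten_cons, List.flatten_nil, List.append_nil,
        PySem.List.slice_to f hi0, List.append_assoc, List.singleton_append]

-- dofindLoop with i = f.length returns immediately, whatever the fuel
lemma dofindLoopFull (s f : List Char) (fuel : Nat) (j : Int) :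
    dofindLoop s f fuel (f.length : Int) j = j - (f.length : Int) := by
  cases fuel <;> simp [dofindLoop]

-- characterisation of dofindLoop against specScan
lemma dofind_spec (s f t : List Char) :
    ∀ (fuel : Nat) (j i : Int) (r : Bool), (s.length - j.toNat) < fuel →
      0 ≤ i → i < (f.length : Int) → i ≤ j → j ≤ (s.length : Int) →
      (dofindLoop s f fuel i j = -1 →
        specScan f t (s.drop j.toNat) i.toNat r = f.take i.toNat ++ s.drop j.toNat)
      ∧ (dofindLoop s f fuel i j ≠ -1 →
        (dofindLoop s f fuel i j = j - i ∨ j < dofindLoop s f fuel i j) ∧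
        0 ≤ dofindLoop s f fuel i j ∧
        dofindLoop s f fuel i j + (f.length : Int) ≤ (s.length : Int) ∧
        specScan f t (s.drop j.toNat) i.toNat r =
          (if dofindLoop s f fuel i j = j - i then (if r then [] else t)
           else f.take i.toNat ++ (s.drop j.toNat).take (dofindLoop s f fuel i j - j).toNat ++ t)
          ++ specScan f t (s.drop (dofindLoop s f fuel i j + (f.length : Int)).toNat) 0 true) := by
  intro fuel
  induction fuel with
  | zero => intro j i r hfuel; omega
  | succ fuel ih =>
    intro j i r hfuel hi0 hilt hij hjle
    by_cases hjlt : j < (s.length : Int)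
    case neg =>
      -- j = len s: the inner while exits at once with i < len f, returning -1
      have hjeq : j = (s.length : Int) := le_antisymm hjle (by omega)
      have hred : dofindLoop s f (fuel + 1) i j = -1 := by
        simp only [dofindLoop, if_neg (by omega : ¬ (i < (f.length : Int) ∧ j < (s.length : Int))),
          if_neg (by omega : ¬ i = (f.length : Int))]
      refine ⟨fun _ => ?_, fun hne => absurd hred hne⟩
      have : s.drop j.toNat = [] := List.drop_eq_nil_of_le (by omega)
      rw [this]
      simp [specScan]
    case pos =>
      have hjn : j.toNat < s.length := by omega
      have hin : i.toNat < f.length := by omega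
      have hdropj : s.drop j.toNat = s[j.toNat] :: s.drop (j.toNat + 1) :=
        List.drop_eq_getElem_cons hjn
      have hj1 : (j + 1).toNat = j.toNat + 1 := by omega
      have hgf : PySem.List.pyGet? f i = some f[i.toNat] := by
        rw [PySem.List.pyGet?_of_nonneg f hi0, List.getElem?_eq_getElem hin]
      have hgs : PySem.List.pyGet? s j = some s[j.toNat] := by
        rw [PySem.List.pyGet?_of_nonneg s (by omega), List.getElem?_eq_getElem hjn]
      by_cases hcmp : PySem.List.pyGet? f i = PySem.List.pyGet? s j
      case pos =>
        have hchar : f[i.toNat] = s[j.toNat] := by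
          rw [hgf, hgs] at hcmp; exact Option.some.inj hcmp
        have hred : dofindLoop s f (fuel + 1) i j = dofindLoop s f fuel (i + 1) (j + 1) := by
          simp only [dofindLoop, if_pos (⟨hilt, hjlt⟩ : i < (f.length : Int) ∧ j < (s.length : Int)),
            if_pos hcmp]
        have hcond : i.toNat < f.length ∧ f[i.toNat]? = some s[j.toNat] := by
          exact ⟨hin, by rw [List.getElem?_eq_getElem hin, hchar]⟩
        by_cases hlen : i + 1 = (f.length : Int)
        case pos =>
          -- the match completes: the next call returns immediately
          have hd : dofindLoop s f (fuel + 1) i j = j + 1 - (f.length : Int) := by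
            rw [hred, hlen, dofindLoopFull]
          have hdval : dofindLoop s f (fuel + 1) i j = j - i := by omega
          constructor
          · intro hneg; rw [hdval] at hneg; omega
          · intro _
            refine ⟨Or.inl hdval, by omega, by omega, ?_⟩
            rw [hdval, if_pos rfl]
            rw [hdropj]
            simp only [specScan, if_pos hcond, if_pos (by omega : i.toNat + 1 = f.length)]
            have : (j - i + (f.length : Int)).toNat = j.toNat + 1 := by omega
            rw [this]
        case neg =>
          have hstep : specScan f t (s.drop j.toNat) i.toNat r
              = specScan f t (s.drop (j.toNat + 1)) (i.toNat + 1) r := by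
            rw [hdropj]
            simp only [specScan, if_pos hcond, if_neg (by omega : ¬ (i.toNat + 1 = f.length))]
          have htake : f.take (i.toNat + 1) = f.take i.toNat ++ [s[j.toNat]] := by
            rw [List.take_add_one, List.getElem?_eq_getElem hin, hchar]; rfl
          obtain ⟨ihA, ihB⟩ := ih (j + 1) (i + 1) r (by omega) (by omega) (by omega) (by omega) (by omega)
          rw [hj1] at ihA ihB
          have hi1 : (i + 1).toNat = i.toNat + 1 := by omega
          rw [hi1] at ihA ihB
          constructor
          · intro hneg
            rw [hred] at hneg
            rw [hstep, ihA hneg, htake, hdropj]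
            simp
          · intro hne
            rw [hred] at hne ⊢
            obtain ⟨hor, hd0, hdlen, hspec⟩ := ihB hne
            refine ⟨by omega, hd0, hdlen, ?_⟩
            rw [hstep, hspec, show j + 1 - (i + 1) = j - i from by omega]
            by_cases hdd : dofindLoop s f fuel (i + 1) (j + 1) = j - i
            · simp only [if_pos hdd]
            · simp only [if_neg hdd]
              have hdj : j + 1 < dofindLoop s f fuel (i + 1) (j + 1) := by omega
              have htk : (s.drop j.toNat).take (dofindLoop s f fuel (i + 1) (j + 1) - j).toNat
                  = s[j.toNat] :: (s.drop (j.toNat + 1)).take (dofindLoop s f fuel (i + 1) (j + 1) - (j + 1)).toNat := by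
                rw [hdropj]
                have : (dofindLoop s f fuel (i + 1) (j + 1) - j).toNat
                    = (dofindLoop s f fuel (i + 1) (j + 1) - (j + 1)).toNat + 1 := by omega
                rw [this, List.take_succ_cons]
              rw [htk, htake]
              simp
      case neg =>
        have hchar : f[i.toNat] ≠ s[j.toNat] := by
          intro h; exact hcmp (by rw [hgf, hgs, h])
        have hred : dofindLoop s f (fuel + 1) i j = dofindLoop s f fuel 0 (j + 1) := by
          simp only [dofindLoop, if_pos (⟨hilt, hjlt⟩ : i < (f.length : Int) ∧ j < (s.length : Int)),
            if_neg hcmp]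
        have hcond : ¬ (i.toNat < f.length ∧ f[i.toNat]? = some s[j.toNat]) := by
          rintro ⟨-, h⟩
          rw [List.getElem?_eq_getElem hin] at h
          exact hchar (Option.some.inj h)
        have hstep : specScan f t (s.drop j.toNat) i.toNat r
            = f.take i.toNat ++ s[j.toNat] :: specScan f t (s.drop (j.toNat + 1)) 0 false := by
          rw [hdropj]
          simp only [specScan, if_neg hcond]
        obtain ⟨ihA, ihB⟩ := ih (j + 1) 0 false (by omega) le_rfl (by omega) (by omega) (by omega)
        rw [hj1] at ihA ihB
        simp only [Int.toNat_zero, sub_zero] at ihA ihB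
        constructor
        · intro hneg
          rw [hred] at hneg
          rw [hstep, ihA hneg, hdropj]
          simp
        · intro hne
          rw [hred] at hne ⊢
          obtain ⟨hor, hd0, hdlen, hspec⟩ := ihB hne
          have hdj : j < dofindLoop s f fuel 0 (j + 1) := by omega
          refine ⟨Or.inr hdj, hd0, hdlen, ?_⟩
          rw [if_neg (by omega : ¬ dofindLoop s f fuel 0 (j + 1) = j - i)]
          rw [hstep, hspec]
          have htk : (s.drop j.toNat).take (dofindLoop s f fuel 0 (j + 1) - j).toNat
              = s[j.toNat] :: (s.drop (j.toNat + 1)).take (dofindLoop s f fuel 0 (j + 1) - (j + 1)).toNat := by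
            rw [hdropj]
            have : (dofindLoop s f fuel 0 (j + 1) - j).toNat
                = (dofindLoop s f fuel 0 (j + 1) - (j + 1)).toNat + 1 := by omega
            rw [this, List.take_succ_cons]
          rw [htk]
          by_cases hdeq : dofindLoop s f fuel 0 (j + 1) = j + 1
          · simp only [if_pos hdeq]
            have h0 : (dofindLoop s f fuel 0 (j + 1) - (j + 1)).toNat = 0 := by omega
            rw [h0]
            simp
          · simp only [if_neg hdeq]
            simp

-- A's outer loop computes specScan with the run flag initially TRUE
lemma rcLoop_spec (s f t : List Char) (hf : f ≠ []) :
    ∀ (fuel : Nat) (start : Int) (buf : List (List Char)),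
      0 ≤ start → start ≤ (s.length : Int) → (s.length - start.toNat) < fuel →
      ((if (rcLoop s f t fuel buf start (start - 1)).2 < (s.length : Int) then
          (rcLoop s f t fuel buf start (start - 1)).1 ++
            [PySem.List.slice s (some (rcLoop s f t fuel buf start (start - 1)).2) none]
        else (rcLoop s f t fuel buf start (start - 1)).1).flatten)
        = buf.flatten ++ specScan f t (s.drop start.toNat) 0 true := by
  intro fuel
  induction fuel with
  | zero => intro start buf h0 hle hfuel; omega
  | succ fuel ih =>
    intro start buf h0 hle hfuel
    have hflen : 0 < f.length := List.length_pos_iff.mpr hf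
    obtain ⟨dA, dB⟩ := dofind_spec s f t (s.length + 1) start 0 true (by omega) le_rfl
      (by exact_mod_cast hflen) h0 hle
    simp only [Int.toNat_zero, List.take_zero, List.nil_append, sub_zero] at dA dB
    by_cases hneg : dofindLoop s f (s.length + 1) 0 start = -1
    · have hred : rcLoop s f t (fuel + 1) buf start (start - 1) = (buf, start) := by
        simp only [rcLoop, dofind, if_pos hneg]
      rw [hred, dA hneg]
      by_cases hlt : start < (s.length : Int)
      · rw [if_pos hlt]
        simp [List.flatten_append, PySem.List.slice_from s h0]
      · rw [if_neg hlt]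
        have : s.drop start.toNat = [] := List.drop_eq_nil_of_le (by omega)
        rw [this]
        simp
    · obtain ⟨hor, hd0, hdlen, hspec⟩ := dB hneg
      set d := dofindLoop s f (s.length + 1) 0 start with hd
      have hred : rcLoop s f t (fuel + 1) buf start (start - 1)
          = rcLoop s f t fuel
              ((if d > start then buf ++ [PySem.List.slice s (some start) (some d)] else buf)
                ++ (if start - 1 < d - 1 then [t] else []))
              (d + (f.length : Int)) (d + (f.length : Int) - 1) := by
        simp only [rcLoop, dofind, ← hd, if_neg hneg]
        by_cases hgt : d > start
        · simp only [if_pos hgt, if_pos (by omega : start - 1 < d - 1)]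
        · simp only [if_neg hgt, if_neg (by omega : ¬ (start - 1 < d - 1))]
          simp
      rw [hred, ih (d + (f.length : Int)) _ (by omega) (by omega) (by omega)]
      rw [hspec]
      by_cases hds : d = start
      · rw [if_pos hds]
        simp only [if_neg (by omega : ¬ d > start), if_neg (by omega : ¬ start - 1 < d - 1)]
        simp
      · have hgt : start < d := by omega
        rw [if_neg hds]
        simp only [if_pos (by omega : d > start), if_pos (by omega : start - 1 < d - 1)]
        have hsl : PySem.List.slice s (some start) (some d)
            = (s.drop start.toNat).take (d - start).toNat := by
          rw [PySem.List.slice_toNat s h0 hd0]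
          congr 1
          omega
        rw [hsl]
        simp [List.flatten_append]

lemma portA_spec (s f t : String) (hf : f.toList ≠ []) :
    replace_continuous s f t = String.ofList (specScan f.toList t.toList s.toList 0 true) := by
  have h := rcLoop_spec s.toList f.toList t.toList hf (s.toList.length + 1) 0 [] le_rfl
    (by exact_mod_cast Nat.zero_le _) (by omega)
  simp only [Int.toNat_zero, List.drop_zero, List.flatten_nil, List.nil_append, zero_sub] at h
  simp only [replace_continuous]
  rw [h]

lemma portB_spec (s f t : String) :
    replace_continuous_alt s f t = String.ofList (specScan f.toList t.toList s.toList 0 false) := by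
  have h := alt_spec f.toList t.toList s.toList [] 0 false le_rfl (by exact_mod_cast Nat.zero_le _)
  simp only [Int.toNat_zero, List.flatten_nil, List.nil_append] at h
  simp only [replace_continuous_alt]
  rw [h]

-- the run flag is irrelevant when t is empty
lemma specScan_flag_t_nil (f : List Char) :
    ∀ (rest : List Char) (i : Nat) (r r' : Bool),
      specScan f [] rest i r = specScan f [] rest i r' := by
  intro rest
  induction rest with
  | nil => intro i r r'; rfl
  | cons c rest ih =>
    intro i r r'
    simp only [specScan]
    split
    · split
      · simp
      · exact ih (i + 1) r r'
    · rfl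

-- the run flag is irrelevant unless the pending match completes before any flush
lemma specScan_flag_not_prefix (f t : List Char) :
    ∀ (rest : List Char) (i : Nat), ¬ (f.drop i <+: rest) →
      specScan f t rest i true = specScan f t rest i false := by
  intro rest
  induction rest with
  | nil => intro i _; rfl
  | cons c rest ih =>
    intro i hnp
    simp only [specScan]
    split
    · rename_i hc
      have hdc : f.drop i = f[i] :: f.drop (i + 1) := List.drop_eq_getElem_cons hc.1
      have hfi : f[i] = c := by
        have h2 := hc.2
        rw [List.getElem?_eq_getElem hc.1] at h2
        exact Option.some.inj h2
      split
      · rename_i hlen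
        exfalso
        apply hnp
        rw [hdc, hfi, List.drop_eq_nil_of_le (by omega : f.length ≤ i + 1)]
        exact ⟨rest, rfl⟩
      · apply ih
        intro hp
        apply hnp
        rw [hdc, hfi]
        exact List.cons_prefix_cons.mpr ⟨rfl, hp⟩
    · rfl

-- when the pending match does complete, the flag decides one leading t
lemma specScan_prefix (f t : List Char) :
    ∀ (rest : List Char) (i : Nat) (r : Bool), i < f.length → f.drop i <+: rest →
      specScan f t rest i r
        = (if r then [] else t) ++ specScan f t (rest.drop (f.length - i)) 0 true := by
  intro rest
  induction rest with
  | nil =>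
    intro i r hi hp
    exfalso
    have h0 : f.drop i = [] := List.prefix_nil.mp hp
    have := List.drop_eq_nil_iff.mp h0
    omega
  | cons c rest ih =>
    intro i r hi hp
    have hdc : f.drop i = f[i] :: f.drop (i + 1) := List.drop_eq_getElem_cons hi
    rw [hdc, List.cons_prefix_cons] at hp
    obtain ⟨hfi, hp'⟩ := hp
    simp only [specScan, hfi, List.getElem?_eq_getElem hi, and_true, hi, if_pos]
    by_cases hlen : i + 1 = f.length
    · rw [if_pos hlen]
      have : f.length - i = 1 := by omega
      rw [this, List.drop_succ_cons, List.drop_zero]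
    · rw [if_neg hlen]
      rw [ih (i + 1) r (by omega) hp']
      have : f.length - i = (f.length - (i + 1)) + 1 := by omega
      rw [this, List.drop_succ_cons]

-- ===== VERDICT (by name: the statement is the Claim_ definition above) =====
theorem replace_continuous_spec : Claim_unchanged_replace_continuous := by
  intro s f t _ hpre hD
  have hf : f.toList ≠ [] := fun h => hpre (by
    have := congrArg String.ofList h
    simpa using this)
  rw [portA_spec s f t hf, portB_spec s f t]
  unfold D_replace_continuous at hD
  by_cases hpfx : f.toList <+: s.toList
  · have ht : t = "" := by
      by_contra hne
      exact hD ⟨hpfx, hne⟩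
    subst ht
    rw [show ("" : String).toList = [] from rfl]
    rw [specScan_flag_t_nil f.toList s.toList 0 true false]
  · rw [specScan_flag_not_prefix f.toList t.toList s.toList 0 (by simpa using hpfx)]

theorem replace_continuous_changed : Claim_changed_replace_continuous := by
  unfold Claim_changed_replace_continuous; decide

theorem replace_continuous_tight : Claim_exact_replace_continuous := by
  intro s f t _ hpre hD
  have hf : f.toList ≠ [] := fun h => hpre (by
    have := congrArg String.ofList h
    simpa using this)
  obtain ⟨hpfx, ht⟩ := hD
  have ht' : t.toList ≠ [] := fun h => ht (by
    have := congrArg String.ofList h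
    simpa using this)
  rw [portA_spec s f t hf, portB_spec s f t]
  have hflen : 0 < f.toList.length := List.length_pos_iff.mpr hf
  have hA := specScan_prefix f.toList t.toList s.toList 0 true hflen (by simpa using hpfx)
  have hB := specScan_prefix f.toList t.toList s.toList 0 false hflen (by simpa using hpfx)
  simp only [if_true, Bool.false_eq_true, if_false, List.nil_append] at hA hB
  intro hcontra
  have : specScan f.toList t.toList s.toList 0 true = specScan f.toList t.toList s.toList 0 false := by
    have := congrArg String.toList hcontra
    simpa using this
  rw [hA, hB] at this
  have hlen := congrArg List.length this
  rw [List.length_append] at hlen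
  exact ht' (List.length_eq_zero_iff.mp (by omega))
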